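-- pv_equiv track=rewrite | github.com/jsuci/gidapp | swertres/unused_scripts/script_search_result_v2.1.py | digits_match
-- ===== SOURCE A (Python) =====
-- def digits_match(res, combi):
--     """Returns True if the given res("123") does contain any pair
--     combiantions from combi("342")"""
--
--     for digit in combi:
--         if digit in res:
--             res = res.replace(digit, "", 1)
--
--     if len(res) == 1 or not res:
--         return True
--     else:
--         return False
-- ===== SOURCE B (Python) =====
-- def digits_match(res, combi):
--     """Returns True if the given res("123") does contain any pair
--     combiantions from combi("342")"""
--
--     matched = 0
--     for d in set(res):
--         matched += min(res.count(d), combi.count(d))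
--     return len(res) - matched <= 1
-- ===== Notes on version B (the rewrite author's own statement) =====
-- stated objective: faster
-- what changed: Replaces A's loop that repeatedly tests membership in and rebuilds a shrinking copy of res (one str.replace per digit of combi) with a count-table intersection: matched = sum over the distinct chars of res of min(res.count(d), combi.count(d)), returning len(res) - matched <= 1.
import Mathlib
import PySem

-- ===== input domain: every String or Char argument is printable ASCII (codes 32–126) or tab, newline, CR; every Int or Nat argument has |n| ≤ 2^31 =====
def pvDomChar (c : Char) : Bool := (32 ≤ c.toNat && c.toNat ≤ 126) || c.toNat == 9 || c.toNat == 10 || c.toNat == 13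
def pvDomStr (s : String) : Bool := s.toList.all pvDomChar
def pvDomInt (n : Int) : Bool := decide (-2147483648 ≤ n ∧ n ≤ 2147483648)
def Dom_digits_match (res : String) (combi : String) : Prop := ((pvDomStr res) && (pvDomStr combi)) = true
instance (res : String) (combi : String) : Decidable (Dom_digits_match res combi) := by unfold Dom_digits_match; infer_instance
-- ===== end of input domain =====

-- B replaces A's per-digit membership-test-and-replace loop on a shrinking string by a
-- count-table intersection over the distinct characters of res (objective: simpler).

-- ===== PORT A =====
-- for digit in combi: if digit in res: res = res.replace(digit, "", 1)
-- res.replace(digit, "", 1) for the 1-char string digit removes the FIRST occurrence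
-- of that character: exactly List.erase (exact, hand-ported).
def digits_match (res : String) (combi : String) : Bool :=
  let final := combi.toList.foldl
    (fun cs d => if PySem.Chars.isIn [d] cs then cs.erase d else cs) res.toList
  -- if len(res) == 1 or not res: return True else: return False
  (final.length == 1) || final.isEmpty

-- ===== PORT B =====
-- matched = 0; for d in set(res): matched += min(res.count(d), combi.count(d))
-- return len(res) - matched <= 1
def digits_match_alt (res : String) (combi : String) : Bool :=
  let matched : Int := (PySem.Set.ofList res.toList).foldl
    (fun m d => m + min (PySem.Str.count res (String.ofList [d]) : Int)
                        (PySem.Str.count combi (String.ofList [d]) : Int)) 0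
  decide ((res.toList.length : Int) - matched ≤ 1)

-- ===== PRECONDITION & SPEC =====
def Spec_digits_match (res : String) (combi : String) (out : Bool) : Prop := out = digits_match_alt res combi
instance (res : String) (combi : String) (out : Bool) : Decidable (Spec_digits_match res combi out) := by unfold Spec_digits_match; infer_instance

-- ===== CLAIM (what is proved, stated in full; the proofs are below) =====
def Claim_equal_digits_match : Prop := ∀ (res : String) (combi : String), Dom_digits_match res combi → Spec_digits_match res combi (digits_match res combi)

-- ===== LEMMAS AND PROOFS =====

-- Python str.count.go on a 1-character needle counts occurrences of that character.
theorem go_singleton (c : Char) : ∀ (cs : List Char) (fuel acc : Nat), cs.length ≤ fuel →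
    PySem.Chars.count.go [c] fuel cs acc = acc + cs.count c
  | [], fuel, acc, _ => by cases fuel <;> simp [PySem.Chars.count.go]
  | h :: t, fuel + 1, acc, hf => by
    rw [PySem.Chars.count.go]
    by_cases hc : c = h
    · subst hc
      simp [List.isPrefixOf, go_singleton c t fuel (acc + 1) (by simpa using hf)]
      omega
    · simp [List.isPrefixOf, hc, go_singleton c t fuel acc (by simpa using hf), Ne.symm hc]

-- Python str.count of a 1-character string is List.count of that character.
theorem chars_count_singleton (c : Char) (cs : List Char) :
    PySem.Chars.count cs [c] = cs.count c := by
  simpa [PySem.Chars.count] using go_singleton c cs cs.length 0 le_rfl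

-- A's guarded remove-first-occurrence loop over combi is List.diff.
theorem portA_final_eq_diff (res combi : List Char) :
    combi.foldl (fun cs d => if PySem.Chars.isIn [d] cs then cs.erase d else cs) res
      = res.diff combi := by
  induction combi generalizing res with
  | nil => simp
  | cons d rest ih =>
    rw [List.foldl_cons, List.diff_cons, ← ih (res.erase d)]
    congr 1
    by_cases hm : d ∈ res
    · simp [PySem.Chars.isIn_iff_infix, List.singleton_infix_iff, hm]
    · simp [PySem.Chars.isIn_iff_infix, List.singleton_infix_iff, hm,
        List.erase_of_not_mem hm]

-- B's sum over the distinct chars of res is the card of the multiset intersection.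
theorem matched_eq_inter_card (res combi : List Char) :
    (PySem.Set.ofList res).foldl
      (fun m d => m + min ((res.count d : Int)) ((combi.count d : Int))) 0
      = (((res : Multiset Char) ∩ (combi : Multiset Char)).card : Int) := by
  rw [PySem.List.foldl_add (PySem.Set.ofList res)
      (fun d => min ((res.count d : Int)) ((combi.count d : Int))) 0, zero_add,
    ← List.sum_toFinset _ (PySem.Set.nodup_ofList res)]
  have hfs : (PySem.Set.ofList res).toFinset = res.toFinset := by
    ext x; simp [PySem.Set.mem_ofList]
  rw [hfs]
  have hsub : ((res : Multiset Char) ∩ (combi : Multiset Char)).toFinset ⊆ res.toFinset := by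
    intro x hx
    simp only [Multiset.mem_toFinset, Multiset.mem_inter, Multiset.mem_coe] at hx
    simpa [List.mem_toFinset] using hx.1
  have := Multiset.toFinset_sum_count_eq ((res : Multiset Char) ∩ (combi : Multiset Char))
  rw [← this, Finset.sum_subset hsub]
  · push_cast
    apply Finset.sum_congr rfl
    intro x _
    simp
  · intro x hxres hx
    simp only [Multiset.mem_toFinset, Multiset.mem_inter, Multiset.mem_coe] at hx
    have hxr : x ∈ res := by simpa using hxres
    have hxc : x ∉ combi := fun hc => hx ⟨hxr, hc⟩
    simp [List.count_eq_zero.mpr hxc]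

-- ===== VERDICT (by name: the statement is the Claim_ definition above) =====
theorem digits_match_spec : Claim_equal_digits_match := by
  intro res combi _
  unfold Spec_digits_match digits_match digits_match_alt
  simp only [PySem.Str.count_eq, String.toList_ofList, chars_count_singleton]
  rw [portA_final_eq_diff, matched_eq_inter_card]
  have hc : (res.toList.diff combi.toList).length
      + ((res.toList : Multiset Char) ∩ (combi.toList : Multiset Char)).card
      = res.toList.length := by
    have h := congrArg Multiset.card
      (Multiset.sub_add_inter (res.toList : Multiset Char) (combi.toList : Multiset Char))
    simpa [Multiset.coe_sub] using h
  rw [Bool.eq_iff_iff]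
  simp only [Bool.or_eq_true, beq_iff_eq, List.isEmpty_iff_length_eq_zero, decide_eq_true_eq]
  omega
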